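-- pv_equiv track=rewrite | github.com/Ndugere/testing_python | image_items.py | image_items
-- ===== SOURCE A (Python) =====
-- def image_items(nums: list) -> str:
--     first_row, last_row = None, None
--     first_col, last_col = None, None
--
--     for i, row in enumerate(nums):
--         for j, col in enumerate(row):
--             if col == 0:
--                 if first_row is None:
--                     first_row = i
--                 if last_row is None or i > last_row:
--                     last_row = i
--                 if first_col is None or j < first_col:
--                     first_col = j
--                 if last_col is None or j > last_col:
--                     last_col = j
--
--     if first_row is None:  # no zeros found
--         return "No image is found!"
--
--     height = (last_row - first_row) + 1
--     width = (last_col - first_col) + 1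
--
--     return f"row: {first_row + 1}, col: {first_col + 1}, width: {width}, height: {height}"
-- ===== SOURCE B (Python) =====
-- def image_items(nums: list) -> str:
--     # Row-level decomposition: keep only rows containing a zero; the bounding box's
--     # rows are the first/last such row, its columns come from each row's first zero
--     # (list.index) and last zero (index in the reversed row).
--     zrows = [(i, row) for i, row in enumerate(nums) if 0 in row]
--     if not zrows:
--         return "No image is found!"
--     first_row = zrows[0][0]
--     last_row = zrows[-1][0]
--     first_col = min(row.index(0) for _, row in zrows)
--     last_col = max(len(row) - 1 - row[::-1].index(0) for _, row in zrows)
--     height = (last_row - first_row) + 1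
--     width = (last_col - first_col) + 1
--     return f"row: {first_row + 1}, col: {first_col + 1}, width: {width}, height: {height}"
-- ===== Notes on version B (the rewrite author's own statement) =====
-- stated objective: alternative
-- what changed: Replaces the cell-level nested scan with four running extrema by a row-level decomposition: filter the rows that contain a zero (first/last of that list give the row bounds) and reduce per-row first-zero positions (list.index) and last-zero positions (index in the reversed row) for the column bounds.
import Mathlib
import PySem

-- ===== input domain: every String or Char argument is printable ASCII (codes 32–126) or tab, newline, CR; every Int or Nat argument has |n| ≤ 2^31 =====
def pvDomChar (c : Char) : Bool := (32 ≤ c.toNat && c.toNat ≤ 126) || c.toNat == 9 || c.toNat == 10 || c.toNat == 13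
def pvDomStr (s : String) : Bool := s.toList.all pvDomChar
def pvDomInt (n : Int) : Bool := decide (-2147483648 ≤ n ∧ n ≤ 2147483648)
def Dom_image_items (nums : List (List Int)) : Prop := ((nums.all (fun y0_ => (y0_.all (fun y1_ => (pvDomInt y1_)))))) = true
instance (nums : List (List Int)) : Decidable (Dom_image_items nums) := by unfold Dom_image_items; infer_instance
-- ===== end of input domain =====

-- B replaces A's cell-level nested scan with four running extrema by a row-level
-- decomposition: filter rows containing a zero, take first/last of that list for the
-- row bounds and reduce per-row index/reversed-index for the column bounds (objective: alternative).

-- ===== PORT A =====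
def PvSt : Type := Option Int × Option Int × Option Int × Option Int

-- the body of A's innermost `if col == 0:` block (four independent option updates)
def pvUpd (st : PvSt) (i j : Int) : PvSt :=
  ((match st.1 with | none => some i | some v => some v),
   (match st.2.1 with | none => some i | some v => if i > v then some i else some v),
   (match st.2.2.1 with | none => some j | some v => if j < v then some j else some v),
   (match st.2.2.2 with | none => some j | some v => if j > v then some j else some v))

def image_items (nums : List (List Int)) : String :=
  let st := (PySem.List.enumerate nums 0).foldl (fun st p =>
    (PySem.List.enumerate p.2 0).foldl (fun st q =>
      if q.2 == 0 then pvUpd st p.1 q.1 else st) st)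
    ((none, none, none, none) : PvSt)
  match st with
  | (none, _, _, _) => "No image is found!"
  | (some fr, lr, fc, lc) =>
    -- in Python last_row/first_col/last_col are always set when first_row is; .getD 0 is a totality guard only
    let lr := lr.getD 0
    let fc := fc.getD 0
    let lc := lc.getD 0
    let height := (lr - fr) + 1
    let width := (lc - fc) + 1
    "row: " ++ PySem.Int.toStr (fr + 1) ++ ", col: " ++ PySem.Int.toStr (fc + 1) ++
      ", width: " ++ PySem.Int.toStr width ++ ", height: " ++ PySem.Int.toStr height

-- ===== PORT B =====
def image_items_alt (nums : List (List Int)) : String :=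
  let zrows := (PySem.List.enumerate nums 0).filter (fun p => p.2.contains 0)
  match zrows with
  | [] => "No image is found!"
  | z :: rest =>
    let first_row := z.1
    -- zrows[-1] on the (nonempty) list zrows
    let last_row := ((z :: rest).getLast (List.cons_ne_nil _ _)).1
    -- each row in zrows contains 0, so row.index(0) succeeds; .getD 0 is a totality guard only
    let first_col := (PySem.List.min? ((z :: rest).map (fun p => ((PySem.List.index? p.2 0).getD 0 : Int))) (fun x => x)).getD 0
    -- row[::-1] is the reversed row (PySem.List.slice?_none_none_neg_one)
    let last_col := (PySem.List.max? ((z :: rest).map (fun p => (p.2.length : Int) - 1 - ((PySem.List.index? p.2.reverse 0).getD 0 : Int))) (fun x => x)).getD 0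
    let height := (last_row - first_row) + 1
    let width := (last_col - first_col) + 1
    "row: " ++ PySem.Int.toStr (first_row + 1) ++ ", col: " ++ PySem.Int.toStr (first_col + 1) ++
      ", width: " ++ PySem.Int.toStr width ++ ", height: " ++ PySem.Int.toStr height

-- ===== PRECONDITION & SPEC =====
def Spec_image_items (nums : List (List Int)) (out : String) : Prop := out = image_items_alt nums
instance (nums : List (List Int)) (out : String) : Decidable (Spec_image_items nums out) := by unfold Spec_image_items; infer_instance

-- ===== CLAIM (what is proved, stated in full; the proofs are below) =====
def Claim_equal_image_items : Prop := ∀ (nums : List (List Int)), Dom_image_items nums → Spec_image_items nums (image_items nums)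

-- ===== LEMMAS AND PROOFS =====

-- the zero-column indices of one row, Python-enumerate style, starting at s
def pvZcols (l : List Int) (s : Int) : List Int :=
  (PySem.List.enumerate l s).filterMap (fun q => if q.2 == 0 then some q.1 else none)

-- the four components of pvUpd, as standalone step functions
def pvF1 (o : Option Int) (i : Int) : Option Int := match o with | none => some i | some v => some v
def pvF2 (o : Option Int) (i : Int) : Option Int := match o with | none => some i | some v => if i > v then some i else some v
def pvF3 (o : Option Int) (j : Int) : Option Int := match o with | none => some j | some v => if j < v then some j else some v
def pvF4 (o : Option Int) (j : Int) : Option Int := match o with | none => some j | some v => if j > v then some j else some v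

-- B's per-row quantities, as named functions
def pvRowMin (p : Int × List Int) : Int := ((PySem.List.index? p.2 0).getD 0 : Int)
def pvRowMax (p : Int × List Int) : Int := (p.2.length : Int) - 1 - ((PySem.List.index? p.2.reverse 0).getD 0 : Int)

theorem pv_zcols_cons (x : Int) (t : List Int) (s : Int) :
    pvZcols (x :: t) s = if x == 0 then s :: pvZcols t (s + 1) else pvZcols t (s + 1) := by
  unfold pvZcols
  rw [PySem.List.enumerate_cons]
  by_cases h : x == 0
  · have hx : x = 0 := by simpa using h
    simp [hx]
  · have hx : x ≠ 0 := by simpa using h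
    simp [hx]

theorem pv_zcols_ge (l : List Int) (s : Int) : ∀ x ∈ pvZcols l s, s ≤ x := by
  induction l generalizing s with
  | nil => intro x hx; simp [pvZcols, PySem.List.enumerate] at hx
  | cons y t ih =>
    intro x hx
    rw [pv_zcols_cons] at hx
    by_cases h : y == 0
    · rw [if_pos h] at hx
      rcases List.mem_cons.mp hx with rfl | hx
      · exact le_refl _
      · have := ih (s + 1) x hx; omega
    · rw [if_neg h] at hx
      have := ih (s + 1) x hx; omega

theorem pv_zcols_pairwise (l : List Int) (s : Int) : (pvZcols l s).Pairwise (· ≤ ·) := by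
  induction l generalizing s with
  | nil => simp [pvZcols, PySem.List.enumerate]
  | cons y t ih =>
    rw [pv_zcols_cons]
    by_cases h : y == 0
    · rw [if_pos h]
      exact List.Pairwise.cons (fun x hx => by have := pv_zcols_ge t (s+1) x hx; omega) (ih (s+1))
    · rw [if_neg h]; exact ih (s + 1)

theorem pv_index?_nil (v : Int) : PySem.List.index? ([] : List Int) v = none :=
  (PySem.List.index?_eq_none_iff _ _).mpr (by simp)

theorem pv_zcols_head? (l : List Int) (s : Int) :
    (pvZcols l s).head? = (PySem.List.index? l 0).map (fun (k : Nat) => s + (k : Int)) := by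
  induction l generalizing s with
  | nil => rw [pv_index?_nil]; simp [pvZcols, PySem.List.enumerate]
  | cons y t ih =>
    rw [pv_zcols_cons]
    by_cases h : y == 0
    · have hy : y = 0 := by simpa using h
      rw [if_pos h, hy, PySem.List.index?_cons_self]
      simp
    · have hy : y ≠ 0 := by simpa using h
      rw [if_neg h, PySem.List.index?_cons_of_ne t hy, ih (s + 1)]
      cases PySem.List.index? t 0 with
      | none => rfl
      | some k =>
        simp only [Option.map_some, Option.some.injEq]
        push_cast
        omega

theorem pv_zcols_eq_nil_iff (l : List Int) (s : Int) : pvZcols l s = [] ↔ 0 ∉ l := by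
  rw [← List.head?_eq_none_iff, pv_zcols_head?, Option.map_eq_none_iff,
    PySem.List.index?_eq_none_iff]

theorem pv_zcols_append (a b : List Int) (s : Int) :
    pvZcols (a ++ b) s = pvZcols a s ++ pvZcols b (s + a.length) := by
  unfold pvZcols
  rw [PySem.List.enumerate_append, List.filterMap_append]

theorem pv_zcols_getLast? (l : List Int) (s : Int) :
    (pvZcols l s).getLast? =
      (PySem.List.index? l.reverse 0).map (fun (k : Nat) => s + (l.length : Int) - 1 - k) := by
  induction l using List.reverseRecOn generalizing s with
  | nil => rw [show (([] : List Int)).reverse = [] from rfl, pv_index?_nil]; simp [pvZcols, PySem.List.enumerate]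
  | append_singleton a x ih =>
    rw [pv_zcols_append, List.reverse_append]
    simp only [List.reverse_singleton, List.singleton_append]
    by_cases h : x == 0
    · have hx : x = 0 := by simpa using h
      rw [hx, PySem.List.index?_cons_self]
      have hone : pvZcols [(0 : Int)] (s + a.length) = [s + a.length] := by
        rw [show ([(0:Int)]) = (0:Int) :: [] from rfl, pv_zcols_cons]
        simp [pvZcols, PySem.List.enumerate]
      rw [hone, List.getLast?_concat]
      simp only [Option.map_some, Option.some.injEq]
      simp only [List.length_append, List.length_singleton]
      push_cast
      omega
    · have hx : x ≠ 0 := by simpa using h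
      have hone : pvZcols [x] (s + a.length) = [] := by
        rw [show ([x]) = x :: [] from rfl, pv_zcols_cons, if_neg h]
        simp [pvZcols, PySem.List.enumerate]
      rw [hone, List.append_nil, PySem.List.index?_cons_of_ne a.reverse hx, ih s]
      cases PySem.List.index? a.reverse 0 with
      | none => rfl
      | some k =>
        simp only [Option.map_some, Option.some.injEq]
        simp only [List.length_append, List.length_singleton]
        push_cast
        omega

-- fold chain lemmas
theorem pv_foldl_min_eq (t : List Int) (x : Int) (h : ∀ y ∈ t, x ≤ y) : t.foldl min x = x := by
  induction t with
  | nil => rfl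
  | cons y t ih =>
    have hx : min x y = x := min_eq_left (h y (by simp))
    simp only [List.foldl_cons, hx]
    exact ih (fun z hz => h z (by simp [hz]))

theorem pv_foldl_max_last (t : List Int) (x : Int) (hp : t.Pairwise (· ≤ ·))
    (h : ∀ y ∈ t, x ≤ y) : t.foldl max x = t.getLastD x := by
  induction t generalizing x with
  | nil => rfl
  | cons y t ih =>
    have hx : max x y = y := max_eq_right (h y (by simp))
    simp only [List.foldl_cons, List.getLastD_cons, hx]
    exact ih y (List.pairwise_cons.mp hp).2 (List.pairwise_cons.mp hp).1

theorem pv_foldl_min_comm (t : List Int) (a x : Int) :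
    t.foldl min (min a x) = min a (t.foldl min x) := by
  induction t generalizing x with
  | nil => rfl
  | cons y t ih =>
    simp only [List.foldl_cons, min_assoc]
    exact ih (min x y)

theorem pv_foldl_max_comm (t : List Int) (a x : Int) :
    t.foldl max (max a x) = max a (t.foldl max x) := by
  induction t generalizing x with
  | nil => rfl
  | cons y t ih =>
    simp only [List.foldl_cons, max_assoc]
    exact ih (max x y)

theorem pv_foldl_max_const {α : Type} (c : List α) (a v : Int) :
    (c.map (fun _ => v)).foldl max a = if c.isEmpty then a else max a v := by
  induction c generalizing a with
  | nil => rfl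
  | cons y t ih =>
    simp only [List.map_cons, List.foldl_cons, List.isEmpty_cons]
    rw [ih (max a v)]
    rcases t with _ | ⟨w, t⟩
    · rfl
    · simp

-- option-fold characterizations
theorem pv_f1_some (t : List Int) (v : Int) : t.foldl pvF1 (some v) = some v := by
  induction t <;> simp_all [pvF1]

theorem pv_f2_some (t : List Int) (v : Int) : t.foldl pvF2 (some v) = some (t.foldl max v) := by
  induction t generalizing v with
  | nil => rfl
  | cons y t ih =>
    have h : pvF2 (some v) y = some (max v y) := by
      simp only [pvF2, max_def]
      split_ifs <;> simp only [Option.some.injEq] <;> omega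
    simp [h, ih]

theorem pv_f3_some (t : List Int) (v : Int) : t.foldl pvF3 (some v) = some (t.foldl min v) := by
  induction t generalizing v with
  | nil => rfl
  | cons y t ih =>
    have h : pvF3 (some v) y = some (min v y) := by
      simp only [pvF3, min_def]
      split_ifs <;> simp only [Option.some.injEq] <;> omega
    simp [h, ih]

theorem pv_f4_some (t : List Int) (v : Int) : t.foldl pvF4 (some v) = some (t.foldl max v) := by
  induction t generalizing v with
  | nil => rfl
  | cons y t ih =>
    have h : pvF4 (some v) y = some (max v y) := by
      simp only [pvF4, max_def]
      split_ifs <;> simp only [Option.some.injEq] <;> omega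
    simp [h, ih]

-- A's inner loop over one row = fold of pvUpd over the zero columns of that row
theorem pv_inner (i : Int) (l : List (Int × Int)) (st : PvSt) :
    l.foldl (fun st q => if q.2 == 0 then pvUpd st i q.1 else st) st
      = (l.filterMap (fun q => if q.2 == 0 then some q.1 else none)).foldl
          (fun st j => pvUpd st i j) st := by
  induction l generalizing st with
  | nil => rfl
  | cons q t ih =>
    simp only [List.foldl_cons, List.filterMap_cons]
    by_cases h : q.2 == 0
    · rw [if_pos h, if_pos h]
      exact ih _
    · rw [if_neg h, if_neg h]
      exact ih st

-- rows without a zero are no-ops of A's outer loop: the fold may be taken over the filtered rows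
theorem pv_skip (E : List (Int × List Int)) (st : PvSt) :
    E.foldl (fun st p => (pvZcols p.2 0).foldl (fun st j => pvUpd st p.1 j) st) st
      = (E.filter (fun p => p.2.contains 0)).foldl
          (fun st p => (pvZcols p.2 0).foldl (fun st j => pvUpd st p.1 j) st) st := by
  induction E generalizing st with
  | nil => rfl
  | cons p t ih =>
    simp only [List.foldl_cons, List.filter_cons]
    by_cases h : p.2.contains 0
    · rw [if_pos h]
      simp only [List.foldl_cons]
      exact ih _
    · rw [if_neg h]
      have hz : pvZcols p.2 0 = [] := (pv_zcols_eq_nil_iff _ _).mpr (by simpa using h)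
      rw [hz]
      exact ih st

-- a pvUpd fold over one row's zero columns splits into the four component folds
theorem pv_row_split (i : Int) (c : List Int) (a b d e : Option Int) :
    c.foldl (fun st j => pvUpd st i j) (a, b, d, e)
      = ((c.map (fun _ => i)).foldl pvF1 a, (c.map (fun _ => i)).foldl pvF2 b,
         c.foldl pvF3 d, c.foldl pvF4 e) := by
  induction c generalizing a b d e with
  | nil => rfl
  | cons j t ih =>
    simp only [List.map_cons, List.foldl_cons]
    rw [show pvUpd (a, b, d, e) i j = (pvF1 a i, pvF2 b i, pvF3 d j, pvF4 e j) from rfl, ih]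

-- the per-row values B computes are exactly the min / max zero columns of that row
theorem pv_rowmin (p : Int × List Int) (m : Int) (t : List Int)
    (hc : pvZcols p.2 0 = m :: t) : t.foldl min m = pvRowMin p := by
  have hh := pv_zcols_head? p.2 0
  rw [hc] at hh
  have hp := pv_zcols_pairwise p.2 0
  rw [hc] at hp
  have hmin : t.foldl min m = m :=
    pv_foldl_min_eq t m (List.pairwise_cons.mp hp).1
  rw [hmin]
  unfold pvRowMin
  cases hk : PySem.List.index? p.2 0 with
  | none => rw [hk] at hh; simp at hh
  | some k =>
    rw [hk] at hh
    simp only [List.head?_cons, Option.map_some, Option.some.injEq] at hh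
    simp [hh]

theorem pv_rowmax (p : Int × List Int) (m : Int) (t : List Int)
    (hc : pvZcols p.2 0 = m :: t) : t.foldl max m = pvRowMax p := by
  have hh := pv_zcols_getLast? p.2 0
  rw [hc, List.getLast?_cons] at hh
  have hp := pv_zcols_pairwise p.2 0
  rw [hc] at hp
  have hmax : t.foldl max m = t.getLastD m :=
    pv_foldl_max_last t m (List.pairwise_cons.mp hp).2 (List.pairwise_cons.mp hp).1
  rw [hmax, List.getLastD_eq_getLast?]
  unfold pvRowMax
  cases hk : PySem.List.index? p.2.reverse 0 with
  | none => rw [hk] at hh; simp at hh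
  | some k =>
    rw [hk] at hh
    simp only [Option.map_some, Option.some.injEq] at hh
    rw [hh]
    simp

-- folds of min / max over the concatenated zero columns = folds over the per-row values
theorem pv_chunks_min (Z : List (Int × List Int)) (v : Int)
    (hZ : ∀ p ∈ Z, p.2.contains 0) :
    Z.foldl (fun a p => (pvZcols p.2 0).foldl min a) v = (Z.map pvRowMin).foldl min v := by
  induction Z generalizing v with
  | nil => rfl
  | cons p t ih =>
    simp only [List.map_cons, List.foldl_cons]
    rcases hc : pvZcols p.2 0 with _ | ⟨m, c⟩
    · exact absurd ((pv_zcols_eq_nil_iff _ _).mp hc)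
        (by simpa using hZ p (by simp))
    · simp only [List.foldl_cons]
      rw [pv_foldl_min_comm c v m, pv_rowmin p m c hc]
      exact ih (min v (pvRowMin p)) (fun q hq => hZ q (by simp [hq]))

theorem pv_chunks_max (Z : List (Int × List Int)) (v : Int)
    (hZ : ∀ p ∈ Z, p.2.contains 0) :
    Z.foldl (fun a p => (pvZcols p.2 0).foldl max a) v = (Z.map pvRowMax).foldl max v := by
  induction Z generalizing v with
  | nil => rfl
  | cons p t ih =>
    simp only [List.map_cons, List.foldl_cons]
    rcases hc : pvZcols p.2 0 with _ | ⟨m, c⟩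
    · exact absurd ((pv_zcols_eq_nil_iff _ _).mp hc)
        (by simpa using hZ p (by simp))
    · simp only [List.foldl_cons]
      rw [pv_foldl_max_comm c v m, pv_rowmax p m c hc]
      exact ih (max v (pvRowMax p)) (fun q hq => hZ q (by simp [hq]))

theorem pv_chunks_fst (Z : List (Int × List Int)) (v : Int)
    (hZ : ∀ p ∈ Z, p.2.contains 0) :
    Z.foldl (fun a p => ((pvZcols p.2 0).map (fun _ => p.1)).foldl max a) v
      = (Z.map Prod.fst).foldl max v := by
  induction Z generalizing v with
  | nil => rfl
  | cons p t ih =>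
    simp only [List.map_cons, List.foldl_cons]
    rw [pv_foldl_max_const (pvZcols p.2 0) v p.1,
      if_neg (by
        simp only [List.isEmpty_iff]
        intro hc
        exact absurd ((pv_zcols_eq_nil_iff _ _).mp hc) (by simpa using hZ p (by simp)))]
    exact ih (max v p.1) (fun q hq => hZ q (by simp [hq]))

-- lift the four option folds over whole rows starting from `some`
theorem pv_rows_f1 (Z : List (Int × List Int)) (v : Int) :
    Z.foldl (fun o p => ((pvZcols p.2 0).map (fun _ => p.1)).foldl pvF1 o) (some v) = some v := by
  induction Z with
  | nil => rfl
  | cons p t ih => simp only [List.foldl_cons, pv_f1_some]; exact ih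

theorem pv_rows_f2 (Z : List (Int × List Int)) (v : Int) :
    Z.foldl (fun o p => ((pvZcols p.2 0).map (fun _ => p.1)).foldl pvF2 o) (some v)
      = some (Z.foldl (fun a p => ((pvZcols p.2 0).map (fun _ => p.1)).foldl max a) v) := by
  induction Z generalizing v with
  | nil => rfl
  | cons p t ih => simp only [List.foldl_cons, pv_f2_some]; exact ih _

theorem pv_rows_f3 (Z : List (Int × List Int)) (v : Int) :
    Z.foldl (fun o p => (pvZcols p.2 0).foldl pvF3 o) (some v)
      = some (Z.foldl (fun a p => (pvZcols p.2 0).foldl min a) v) := by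
  induction Z generalizing v with
  | nil => rfl
  | cons p t ih => simp only [List.foldl_cons, pv_f3_some]; exact ih _

theorem pv_rows_f4 (Z : List (Int × List Int)) (v : Int) :
    Z.foldl (fun o p => (pvZcols p.2 0).foldl pvF4 o) (some v)
      = some (Z.foldl (fun a p => (pvZcols p.2 0).foldl max a) v) := by
  induction Z generalizing v with
  | nil => rfl
  | cons p t ih => simp only [List.foldl_cons, pv_f4_some]; exact ih _

-- the state fold splits componentwise
theorem pv_state_split (Z : List (Int × List Int)) (a b d e : Option Int) :
    Z.foldl (fun st p => (pvZcols p.2 0).foldl (fun st j => pvUpd st p.1 j) st) (a, b, d, e)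
      = (Z.foldl (fun o p => ((pvZcols p.2 0).map (fun _ => p.1)).foldl pvF1 o) a,
         Z.foldl (fun o p => ((pvZcols p.2 0).map (fun _ => p.1)).foldl pvF2 o) b,
         Z.foldl (fun o p => (pvZcols p.2 0).foldl pvF3 o) d,
         Z.foldl (fun o p => (pvZcols p.2 0).foldl pvF4 o) e) := by
  induction Z generalizing a b d e with
  | nil => rfl
  | cons p t ih =>
    simp only [List.foldl_cons]
    rw [pv_row_split, ih]

-- last element of a cons, through Prod.fst
theorem pv_getLast_fst (rest : List (Int × List Int)) (z : Int × List Int) :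
    ((z :: rest).getLast (List.cons_ne_nil _ _)).1 = (rest.map Prod.fst).getLastD z.1 := by
  induction rest generalizing z with
  | nil => rfl
  | cons r t ih =>
    rw [List.getLast_cons (List.cons_ne_nil _ _)]
    simp only [List.map_cons, List.getLastD_cons]
    exact ih r

-- ===== VERDICT (by name: the statement is the Claim_ definition above) =====
theorem image_items_spec : Claim_equal_image_items := by
  intro nums _
  unfold Spec_image_items
  have hfun : (fun (st : PvSt) (p : Int × List Int) =>
      (PySem.List.enumerate p.2 0).foldl (fun st q => if q.2 == 0 then pvUpd st p.1 q.1 else st) st)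
    = (fun (st : PvSt) (p : Int × List Int) =>
      (pvZcols p.2 0).foldl (fun st j => pvUpd st p.1 j) st) := by
    funext st p
    rw [pv_inner]
    rfl
  rcases hZ : (PySem.List.enumerate nums 0).filter (fun p => p.2.contains 0) with _ | ⟨z, rest⟩
  · have hA : image_items nums = "No image is found!" := by
      unfold image_items
      rw [hfun, pv_skip, hZ]
      rfl
    have hB : image_items_alt nums = "No image is found!" := by
      unfold image_items_alt
      rw [hZ]
    rw [hA, hB]
  · have hmemZ : ∀ p ∈ (z :: rest), p.2.contains 0 := by
      intro p hp
      have hp' : p ∈ (PySem.List.enumerate nums 0).filter (fun p => p.2.contains 0) := hZ ▸ hp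
      exact (List.mem_filter.mp hp').2
    obtain ⟨m, c, hc⟩ : ∃ m c, pvZcols z.2 0 = m :: c := by
      rcases h : pvZcols z.2 0 with _ | ⟨m, c⟩
      · exact absurd ((pv_zcols_eq_nil_iff _ _).mp h) (by simpa using hmemZ z (by simp))
      · exact ⟨m, c, rfl⟩
    have hpair : (z :: rest).Pairwise (fun p q => p.1 < q.1) := by
      have hE := PySem.List.pairwise_lt_enumerate (xs := nums) (s := 0)
      exact hZ ▸ List.Pairwise.sublist List.filter_sublist hE
    have hrest : ∀ p ∈ rest, p.2.contains 0 := fun p hp => hmemZ p (by simp [hp])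
    have hpw : (rest.map Prod.fst).Pairwise (fun a b : Int => a ≤ b) := by
      rw [List.pairwise_map]
      exact ((List.pairwise_cons.mp hpair).2).imp (fun h => le_of_lt h)
    have hle : ∀ y ∈ rest.map Prod.fst, z.1 ≤ y := by
      intro y hy
      obtain ⟨w, hw, rfl⟩ := List.mem_map.mp hy
      exact le_of_lt ((List.pairwise_cons.mp hpair).1 w hw)
    -- B's value, with its reductions applied
    have hbmin : PySem.List.min? ((z :: rest).map (fun p => ((PySem.List.index? p.2 0).getD 0 : Int))) (fun x => x)
        = some ((rest.map pvRowMin).foldl min (pvRowMin z)) := by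
      rw [show (fun p : Int × List Int => ((PySem.List.index? p.2 0).getD 0 : Int)) = pvRowMin from rfl,
        List.map_cons, PySem.List.min?_id_cons]
    have hbmax : PySem.List.max? ((z :: rest).map (fun p => (p.2.length : Int) - 1 - ((PySem.List.index? p.2.reverse 0).getD 0 : Int))) (fun x => x)
        = some ((rest.map pvRowMax).foldl max (pvRowMax z)) := by
      rw [show (fun p : Int × List Int => (p.2.length : Int) - 1 - ((PySem.List.index? p.2.reverse 0).getD 0 : Int)) = pvRowMax from rfl,
        List.map_cons, PySem.List.max?_id_cons]
    have hB : image_items_alt nums =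
        "row: " ++ PySem.Int.toStr (z.1 + 1) ++ ", col: " ++
          PySem.Int.toStr ((some ((rest.map pvRowMin).foldl min (pvRowMin z))).getD 0 + 1) ++ ", width: " ++
          PySem.Int.toStr ((some ((rest.map pvRowMax).foldl max (pvRowMax z))).getD 0 -
            (some ((rest.map pvRowMin).foldl min (pvRowMin z))).getD 0 + 1) ++ ", height: " ++
          PySem.Int.toStr ((rest.map Prod.fst).foldl max z.1 - z.1 + 1) := by
      unfold image_items_alt
      rw [hZ, pv_foldl_max_last _ _ hpw hle, ← pv_getLast_fst, ← hbmin, ← hbmax]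
    rw [hB]
    unfold image_items
    rw [hfun, pv_skip, hZ, pv_state_split]
    simp only [List.foldl_cons, hc, List.map_cons]
    have e1 : ((c.map fun _ => z.1).foldl pvF1 (pvF1 none z.1)) = some z.1 := by
      rw [show pvF1 none z.1 = some z.1 from rfl, pv_f1_some]
    have e2 : ((c.map fun _ => z.1).foldl pvF2 (pvF2 none z.1)) = some z.1 := by
      rw [show pvF2 none z.1 = some z.1 from rfl, pv_f2_some, pv_foldl_max_const]
      rcases c <;> simp
    have e3 : (c.foldl pvF3 (pvF3 none m)) = some (pvRowMin z) := by
      rw [show pvF3 none m = some m from rfl, pv_f3_some, pv_rowmin z m c hc]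
    have e4 : (c.foldl pvF4 (pvF4 none m)) = some (pvRowMax z) := by
      rw [show pvF4 none m = some m from rfl, pv_f4_some, pv_rowmax z m c hc]
    rw [e1, e2, e3, e4, pv_rows_f1, pv_rows_f2, pv_rows_f3, pv_rows_f4,
      pv_chunks_fst rest z.1 hrest, pv_chunks_min rest (pvRowMin z) hrest,
      pv_chunks_max rest (pvRowMax z) hrest]
    rfl
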